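-- pv_equiv track=rewrite | github.com/mrazomej/scribe | src/scribe/models/config/parameter_mapping.py | _rename_suffixed_key
-- ===== SOURCE A (Python) =====
-- from typing import Any, Dict, Set, List, NamedTuple
--
-- DESCRIPTIVE_NAMES: Dict[str, str] = {
--     # Core NB parameters
--     "r": "dispersion",
--     "p": "prob",
--     "mu": "expression",
--     "phi": "odds",
--     "gate": "zero_inflation",
--     # Capture parameters
--     "p_capture": "capture_prob",
--     "phi_capture": "capture_odds",
--     "eta_capture": "capture_efficiency",
--     # Already descriptive (identity)
--     "bnb_concentration": "bnb_concentration",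
--     "mixing_weights": "mixing_weights",
--     "z": "latent_embedding",
-- }
--
-- def _rename_suffixed_key(key: str) -> str:
--     """Rename a suffixed key like ``r_0`` -> ``dispersion_0``.
--
--     Tries progressively longer prefixes so that multi-part internal names
--     like ``p_capture_0`` are handled correctly (``p_capture`` is in the
--     mapping, not ``p``).
--     """
--     parts = key.split("_")
--     # Try longest prefix first (e.g. "p_capture" before "p")
--     for i in range(len(parts) - 1, 0, -1):
--         prefix = "_".join(parts[:i])
--         suffix = "_".join(parts[i:])
--         if prefix in DESCRIPTIVE_NAMES:
--             return f"{DESCRIPTIVE_NAMES[prefix]}_{suffix}"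
--     return key
-- ===== SOURCE B (Python) =====
-- DESCRIPTIVE_NAMES = {
--     "r": "dispersion",
--     "p": "prob",
--     "mu": "expression",
--     "phi": "odds",
--     "gate": "zero_inflation",
--     "p_capture": "capture_prob",
--     "phi_capture": "capture_odds",
--     "eta_capture": "capture_efficiency",
--     "bnb_concentration": "bnb_concentration",
--     "mixing_weights": "mixing_weights",
--     "z": "latent_embedding",
-- }
--
--
-- def _rename_suffixed_key(key: str) -> str:
--     """Rename a suffixed key like ``r_0`` -> ``dispersion_0``.
--
--     Scans the mapping once and keeps the longest mapping key ``k`` such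
--     that ``key`` starts with ``k + "_"``; no prefix lists are built.
--     """
--     best = None
--     for k, v in DESCRIPTIVE_NAMES.items():
--         if key.startswith(k + "_") and (best is None or len(best[0]) < len(k)):
--             best = (k, v)
--     if best is None:
--         return key
--     return best[1] + "_" + key[len(best[0]) + 1:]
-- ===== Notes on version B (the rewrite author's own statement) =====
-- stated objective: alternative
-- what changed: Instead of splitting the key on '_' and joining/testing every prefix from longest to shortest, B makes a single pass over DESCRIPTIVE_NAMES.items() keeping the longest mapping key k with key.startswith(k + '_'), then rebuilds the name from the stored (k, v).
import Mathlib
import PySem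

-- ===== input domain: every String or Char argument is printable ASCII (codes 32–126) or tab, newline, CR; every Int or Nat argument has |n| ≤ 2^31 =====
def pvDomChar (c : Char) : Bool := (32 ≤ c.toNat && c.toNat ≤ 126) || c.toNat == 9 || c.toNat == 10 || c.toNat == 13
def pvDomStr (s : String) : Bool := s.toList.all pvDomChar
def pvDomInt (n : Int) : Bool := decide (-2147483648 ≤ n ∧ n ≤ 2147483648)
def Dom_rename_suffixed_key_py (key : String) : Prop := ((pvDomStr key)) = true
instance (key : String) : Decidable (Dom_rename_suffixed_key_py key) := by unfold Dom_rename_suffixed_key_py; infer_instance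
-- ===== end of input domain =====

-- B scans the fixed mapping once for the longest key k with key.startswith(k + "_") instead of
-- A's split-then-try-every-prefix loop (objective: alternative traversal of the same data).

-- ===== PORT A =====
-- the module constant DESCRIPTIVE_NAMES; str keys/values as code-point lists (exact for ASCII)
def DESCRIPTIVE_NAMES : PySem.Dict (List Char) (List Char) :=
  PySem.Dict.ofList [
    ("r".toList, "dispersion".toList),
    ("p".toList, "prob".toList),
    ("mu".toList, "expression".toList),
    ("phi".toList, "odds".toList),
    ("gate".toList, "zero_inflation".toList),
    ("p_capture".toList, "capture_prob".toList),
    ("phi_capture".toList, "capture_odds".toList),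
    ("eta_capture".toList, "capture_efficiency".toList),
    ("bnb_concentration".toList, "bnb_concentration".toList),
    ("mixing_weights".toList, "mixing_weights".toList),
    ("z".toList, "latent_embedding".toList)]

-- A's body on code points: parts = key.split("_"); for i in range(len(parts)-1, 0, -1): join the
-- prefix/suffix and return on the first (longest-prefix) hit; the early-return loop is findSome?.
def renameCharsA (s : List Char) : List Char :=
  let parts := PySem.Chars.splitOn s ['_']
  match (PySem.List.pyRange ((parts.length : Int) - 1) 0 (-1)).findSome? (fun i =>
      let pre := PySem.Chars.join ['_'] (PySem.List.slice parts none (some i))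
      let suf := PySem.Chars.join ['_'] (PySem.List.slice parts (some i) none)
      match DESCRIPTIVE_NAMES.get? pre with
      | some v => some (v ++ '_' :: suf)
      | none => none) with
  | some r => r
  | none => s

def rename_suffixed_key_py (key : String) : String :=
  String.ofList (renameCharsA key.toList)

-- ===== PORT B =====
-- B's body on code points: one pass over DESCRIPTIVE_NAMES.items(), keeping the longest k with
-- key.startswith(k + "_"); then v + "_" + key[len(k)+1:].
def renameCharsB (s : List Char) : List Char :=
  let best := DESCRIPTIVE_NAMES.items.foldl (fun b kv =>
      if PySem.Chars.startswith s (kv.1 ++ ['_']) &&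
         (match b with
          | none => true
          | some p => decide (p.1.length < kv.1.length)) then some kv else b) none
  match best with
  | some kv => kv.2 ++ '_' :: PySem.Chars.slice s (some ((kv.1.length : Int) + 1)) none
  | none => s

def rename_suffixed_key_py_alt (key : String) : String :=
  String.ofList (renameCharsB key.toList)

-- ===== PRECONDITION & SPEC =====
def Spec_rename_suffixed_key_py (key : String) (out : String) : Prop := out = rename_suffixed_key_py_alt key
instance (key : String) (out : String) : Decidable (Spec_rename_suffixed_key_py key out) := by unfold Spec_rename_suffixed_key_py; infer_instance

-- ===== CLAIM (what is proved, stated in full; the proofs are below) =====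
def Claim_equal_rename_suffixed_key_py : Prop := ∀ (key : String), Dom_rename_suffixed_key_py key → Spec_rename_suffixed_key_py key (rename_suffixed_key_py key)

-- ===== LEMMAS AND PROOFS =====

-- reference split on '_' (pre = characters of the current piece read so far)
def sp1 (pre : List Char) : List Char → List (List Char)
  | [] => [pre]
  | c :: rest => if c = '_' then pre :: sp1 [] rest else sp1 (pre ++ [c]) rest

-- reference join with '_'
def jn : List (List Char) → List Char
  | [] => []
  | [a] => a
  | a :: b :: t => a ++ '_' :: jn (b :: t)

theorem sp1_ne_nil (pre l : List Char) : sp1 pre l ≠ [] := by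
  induction l generalizing pre with
  | nil => simp [sp1]
  | cons c rest ih =>
    simp only [sp1]
    split_ifs
    · simp
    · exact ih _

theorem splitOn_go_eq (fuel : Nat) (l cur : List Char) (acc : List (List Char))
    (h : l.length < fuel) :
    PySem.Chars.splitOn.go ['_'] fuel l cur acc = acc.reverse ++ sp1 cur.reverse l := by
  induction fuel generalizing l cur acc with
  | zero => omega
  | succ fuel ih =>
    cases l with
    | nil => rw [PySem.Chars.splitOn.go.eq_def]; simp [sp1]
    | cons c rest =>
      have hr : rest.length < fuel := by simpa using Nat.lt_of_succ_lt_succ h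
      rw [PySem.Chars.splitOn.go.eq_def]
      simp only [List.isPrefixOf, Bool.and_true]
      by_cases hc : ('_' : Char) = c
      · subst hc
        rw [if_pos (by simp)]
        simp only [List.length_singleton, List.length_nil, List.drop_succ_cons, List.drop_zero]
        rw [ih rest [] (cur.reverse :: acc) hr]
        simp [sp1]
      · rw [if_neg (by simp [hc])]
        rw [ih rest (c :: cur) acc hr]
        have hs : sp1 cur.reverse (c :: rest) = sp1 (cur.reverse ++ [c]) rest := by
          simp only [sp1]
          rw [if_neg (fun hh : c = '_' => hc hh.symm)]
        simp [hs]

theorem splitOn_eq (s : List Char) : PySem.Chars.splitOn s ['_'] = sp1 [] s := by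
  unfold PySem.Chars.splitOn
  rw [splitOn_go_eq _ _ _ _ (by omega)]
  simp

theorem join_eq (L : List (List Char)) : PySem.Chars.join ['_'] L = jn L := by
  unfold PySem.Chars.join
  induction L with
  | nil => simp [jn, List.intercalate]
  | cons a t ih =>
    cases t with
    | nil => simp [jn, List.intercalate]
    | cons b t' =>
      simp only [jn]
      rw [← ih]
      simp [List.intercalate, List.intersperse]

theorem jn_sp1 (pre l : List Char) : jn (sp1 pre l) = pre ++ l := by
  induction l generalizing pre with
  | nil => simp [sp1, jn]
  | cons c rest ih =>
    simp only [sp1]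
    split_ifs with hc
    · subst hc
      have hne := sp1_ne_nil ([] : List Char) rest
      cases h : sp1 ([] : List Char) rest with
      | nil => exact absurd h hne
      | cons x xs =>
        have := ih ([] : List Char)
        rw [h] at this
        simp only [jn, h]
        simpa using this
    · rw [ih]
      simp

theorem sp1_append (a b : List Char) : ∀ pre, sp1 pre (a ++ '_' :: b) = sp1 pre a ++ sp1 [] b := by
  induction a with
  | nil => intro pre; simp [sp1]
  | cons c a' ih =>
    intro pre
    simp only [List.cons_append, sp1]
    split_ifs with hc
    · simp [ih]
    · exact ih _

theorem jn_take_drop (L : List (List Char)) : ∀ i, 1 ≤ i → i < L.length →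
    jn L = jn (L.take i) ++ '_' :: jn (L.drop i) := by
  induction L with
  | nil => intro i _ h; simp at h
  | cons a rest ih =>
    intro i h1 h2
    simp only [List.length_cons] at h2
    obtain ⟨i', rfl⟩ : ∃ i', i = i' + 1 := ⟨i - 1, by omega⟩
    cases i' with
    | zero =>
      cases rest with
      | nil => simp only [List.length_nil] at h2; omega
      | cons b t => simp [jn]
    | succ j =>
      cases rest with
      | nil => simp only [List.length_nil] at h2; omega
      | cons b t =>
        have hj : 1 ≤ j + 1 := by omega
        have hj2 : j + 1 < (b :: t).length := by simp only [List.length_cons] at h2 ⊢; omega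
        have hrec := ih (j + 1) hj hj2
        have htk : (b :: t).take (j+1) ≠ [] := by simp
        cases h : (b :: t).take (j+1) with
        | nil => exact absurd h htk
        | cons x xs =>
          rw [h] at hrec
          simp only [List.take_succ_cons, List.drop_succ_cons, h, jn]
          rw [hrec]
          simp [jn]

theorem jn_take_lt (L : List (List Char)) (i j : Nat) (h1 : 1 ≤ i) (hij : i < j)
    (hj : j ≤ L.length) : (jn (L.take i)).length < (jn (L.take j)).length := by
  have hlen : (L.take j).length = j := by simp; omega
  have := jn_take_drop (L.take j) i h1 (by omega)
  rw [List.take_take, min_eq_left (by omega)] at this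
  rw [this]
  simp

-- descending range
theorem pyRange_desc (n : Nat) :
    PySem.List.pyRange (n : Int) 0 (-1) = (List.range n).map (fun k : Nat => (n : Int) - (k : Int)) := by
  unfold PySem.List.pyRange
  simp only [if_neg (by norm_num : ¬ (-1 : Int) = 0)]
  have hcount : (if 0 < (-1 : Int) then if (n : Int) < 0 then (((0:Int) - n + -1 - 1) / -1).toNat else 0
      else if (0:Int) < n then (((n:Int) - 0 + -(-1) - 1) / -(-1)).toNat else 0) = n := by
    rw [if_neg (by norm_num)]
    by_cases h : (0:Int) < n
    · rw [if_pos h]; norm_num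
    · rw [if_neg h]; omega
  rw [hcount]
  refine List.map_congr_left ?_
  intro k _
  omega

theorem findSome?_desc {β : Type} (g : Int → Option β) :
    ∀ (l : List Int), l.Pairwise (fun a b => b < a) → ∀ (j : Int) (r : β), j ∈ l → g j = some r →
    (∀ x ∈ l, j < x → g x = none) → l.findSome? g = some r := by
  intro l hpw
  induction l with
  | nil => intro j r hj; simp at hj
  | cons a t ih =>
    intro j r hj hg hnone
    rw [List.pairwise_cons] at hpw
    rcases List.mem_cons.mp hj with rfl | hjt
    · simp [List.findSome?, hg]
    · have haj : j < a := hpw.1 j hjt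
      have hga : g a = none := hnone a (List.mem_cons_self) haj
      simp only [List.findSome?, hga]
      exact ih hpw.2 j r hjt hg (fun x hx => hnone x (List.mem_cons_of_mem _ hx))

-- the fold in B: invariant
def bstep (s : List Char) (b : Option (List Char × List Char)) (kv : List Char × List Char) :
    Option (List Char × List Char) :=
  if PySem.Chars.startswith s (kv.1 ++ ['_']) &&
     (match b with
      | none => true
      | some p => decide (p.1.length < kv.1.length)) then some kv else b

def bInv (s : List Char) (pr : List (List Char × List Char)) (b : Option (List Char × List Char)) : Prop :=
  (b = none ∧ ∀ kv ∈ pr, ¬ (kv.1 ++ ['_']) <+: s) ∨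
  (∃ p, b = some p ∧ p ∈ pr ∧ (p.1 ++ ['_']) <+: s ∧
    ∀ kv ∈ pr, (kv.1 ++ ['_']) <+: s → kv.1.length ≤ p.1.length)

theorem foldB_spec (s : List Char) :
    ∀ (L pr : List (List Char × List Char)) (b : Option (List Char × List Char)),
    bInv s pr b → bInv s (pr ++ L) (L.foldl (bstep s) b) := by
  intro L
  induction L with
  | nil => intro pr b h; simpa using h
  | cons kv t ih =>
    intro pr b h
    have step : bInv s (pr ++ [kv]) (bstep s b kv) := by
      unfold bstep
      split_ifs with hcond
      · -- best becomes kv: kv matches and beats the previous best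
        rw [Bool.and_eq_true] at hcond
        have hmp : (kv.1 ++ ['_']) <+: s := (PySem.Chars.startswith_iff _ _).mp hcond.1
        right
        refine ⟨kv, rfl, List.mem_append.mpr (Or.inr (by simp)), hmp, ?_⟩
        intro kv' hkv' hm'
        rcases List.mem_append.mp hkv' with h1 | h1
        · rcases h with ⟨hb, hall⟩ | ⟨p, hb, hpm, hpt, hmax⟩
          · exact absurd hm' (hall _ h1)
          · subst hb
            simp only [decide_eq_true_eq] at hcond
            exact le_of_lt (lt_of_le_of_lt (hmax _ h1 hm') hcond.2)
        · rw [List.mem_singleton] at h1; subst h1; omega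
      · -- best unchanged
        rcases h with ⟨hb, hall⟩ | ⟨p, hb, hpm, hpt, hmax⟩
        · subst hb
          left
          refine ⟨rfl, ?_⟩
          intro kv' hkv'
          rcases List.mem_append.mp hkv' with h1 | h1
          · exact hall _ h1
          · rw [List.mem_singleton] at h1; subst h1
            intro hp
            exact hcond (by simp [(PySem.Chars.startswith_iff _ _).mpr hp])
        · subst hb
          right
          refine ⟨p, rfl, List.mem_append.mpr (Or.inl hpm), hpt, ?_⟩
          intro kv' hkv' hm'
          rcases List.mem_append.mp hkv' with h1 | h1
          · exact hmax _ h1 hm'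
          · rw [List.mem_singleton] at h1; subst h1
            by_contra hgt
            simp only [not_le] at hgt
            exact hcond (by simp [(PySem.Chars.startswith_iff _ _).mpr hm', hgt])
    have := ih (pr ++ [kv]) (bstep s b kv) step
    simpa [List.append_assoc] using this

-- membership in the literal dict determines the get?
theorem items_eq : DESCRIPTIVE_NAMES.items = [
    ("r".toList, "dispersion".toList),
    ("p".toList, "prob".toList),
    ("mu".toList, "expression".toList),
    ("phi".toList, "odds".toList),
    ("gate".toList, "zero_inflation".toList),
    ("p_capture".toList, "capture_prob".toList),
    ("phi_capture".toList, "capture_odds".toList),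
    ("eta_capture".toList, "capture_efficiency".toList),
    ("bnb_concentration".toList, "bnb_concentration".toList),
    ("mixing_weights".toList, "mixing_weights".toList),
    ("z".toList, "latent_embedding".toList)] := by decide

theorem mem_get? {k v : List Char} (h : (k, v) ∈ DESCRIPTIVE_NAMES.items) :
    DESCRIPTIVE_NAMES.get? k = some v := by
  rw [items_eq] at h
  simp only [List.mem_cons, List.not_mem_nil, or_false, Prod.mk.injEq] at h
  rcases h with ⟨rfl, rfl⟩ | ⟨rfl, rfl⟩ | ⟨rfl, rfl⟩ | ⟨rfl, rfl⟩ | ⟨rfl, rfl⟩ | ⟨rfl, rfl⟩ |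
    ⟨rfl, rfl⟩ | ⟨rfl, rfl⟩ | ⟨rfl, rfl⟩ | ⟨rfl, rfl⟩ | ⟨rfl, rfl⟩ <;> decide

theorem get?_mem {k : List Char} {v : List Char} (h : DESCRIPTIVE_NAMES.get? k = some v) :
    (k, v) ∈ DESCRIPTIVE_NAMES.items := by
  unfold PySem.Dict.get? at h
  cases hf : List.find? (fun p => p.1 == k) DESCRIPTIVE_NAMES.items with
  | none => rw [hf] at h; simp at h
  | some p =>
    rw [hf] at h
    simp only [Option.map_some, Option.some.injEq] at h
    have hm := List.mem_of_find?_eq_some hf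
    have hk := List.find?_some hf
    simp only [beq_iff_eq] at hk
    obtain ⟨pk, pv⟩ := p
    simp only at hk h
    subst hk; subst h
    exact hm

-- the central pointwise equivalence
theorem renameChars_eq (s : List Char) : renameCharsA s = renameCharsB s := by
  have hparts : PySem.Chars.splitOn s ['_'] = sp1 [] s := splitOn_eq s
  have hjnparts : jn (PySem.Chars.splitOn s ['_']) = s := by rw [hparts]; exact jn_sp1 [] s
  have hinv := foldB_spec s DESCRIPTIVE_NAMES.items [] none (Or.inl ⟨rfl, by simp⟩)
  simp only [List.nil_append] at hinv
  have hfold : DESCRIPTIVE_NAMES.items.foldl (fun b kv =>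
      if PySem.Chars.startswith s (kv.1 ++ ['_']) &&
         (match b with
          | none => true
          | some p => decide (p.1.length < kv.1.length)) then some kv else b) none
      = DESCRIPTIVE_NAMES.items.foldl (bstep s) none := rfl
  simp only [renameCharsA, renameCharsB, hfold]
  set parts := PySem.Chars.splitOn s ['_'] with hpdef
  rcases hinv with ⟨hb, hall⟩ | ⟨p, hb, hpm, hpt, hmax⟩
  · -- no key of the mapping matches: both sides return s
    have hnone : ∀ x ∈ PySem.List.pyRange ((parts.length : Int) - 1) 0 (-1),
        (match DESCRIPTIVE_NAMES.get? (PySem.Chars.join ['_'] (PySem.List.slice parts none (some x))) with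
         | some v => some (v ++ '_' :: PySem.Chars.join ['_'] (PySem.List.slice parts (some x) none))
         | none => (none : Option (List Char))) = none := by
      intro x hx
      cases hg : DESCRIPTIVE_NAMES.get? (PySem.Chars.join ['_'] (PySem.List.slice parts none (some x))) with
      | none => simp [hg]
      | some v =>
        exfalso
        have hn1 : 1 ≤ parts.length := by
          rw [hparts]
          cases h : sp1 [] s with
          | nil => exact absurd h (sp1_ne_nil [] s)
          | cons a t => simp [h]
        obtain ⟨m, hm⟩ := Nat.exists_eq_add_of_le hn1
        have hcast : ((parts.length : Int) - 1) = ((m : Nat) : Int) := by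
          rw [hm]; push_cast; ring
        rw [hcast, pyRange_desc m] at hx
        simp only [List.mem_map, List.mem_range] at hx
        obtain ⟨kk, hkk, rfl⟩ := hx
        have hx1' : 1 ≤ ((m : Int) - kk).toNat := by omega
        have hxlt : ((m : Int) - kk).toNat < parts.length := by omega
        rw [PySem.List.slice_to _ (by omega), join_eq] at hg
        have hmem := get?_mem hg
        have hsplit := jn_take_drop parts (((m : Int) - kk).toNat) hx1' hxlt
        rw [hjnparts] at hsplit
        exact hall _ hmem ⟨jn (parts.drop (((m : Int) - kk).toNat)), by rw [hsplit]; simp⟩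
    have hres : List.findSome? (fun i =>
        match DESCRIPTIVE_NAMES.get? (PySem.Chars.join ['_'] (PySem.List.slice parts none (some i))) with
        | some v => some (v ++ '_' :: PySem.Chars.join ['_'] (PySem.List.slice parts (some i) none))
        | none => none) (PySem.List.pyRange ((parts.length : Int) - 1) 0 (-1)) = none :=
      List.findSome?_eq_none_iff.mpr hnone
    simp only [hb, hres]
  · -- p = (k, v) is the longest matching pair: A's loop first succeeds exactly at its boundary
    obtain ⟨t, ht⟩ := hpt
    rw [List.append_assoc, List.singleton_append] at ht
    have hBslice : PySem.Chars.slice s (some ((p.1.length : Int) + 1)) none = t := by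
      have h1 : ((p.1.length : Int) + 1) = ((p.1.length + 1 : Nat) : Int) := by push_cast; ring
      rw [h1, PySem.Chars.slice_eq_listSlice, PySem.List.slice_from_natCast, ← ht]
      simp
    have hsp : sp1 [] s = sp1 [] p.1 ++ sp1 [] t := by
      rw [← ht]; exact sp1_append p.1 t []
    set i0 := (sp1 [] p.1).length with hi0
    have hi01 : 1 ≤ i0 := by
      rw [hi0]
      cases h : sp1 [] p.1 with
      | nil => exact absurd h (sp1_ne_nil [] p.1)
      | cons a u => simp [h]
    have ht1 : 1 ≤ (sp1 [] t).length := by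
      cases h : sp1 [] t with
      | nil => exact absurd h (sp1_ne_nil [] t)
      | cons a u => simp [h]
    have hlen : parts.length = i0 + (sp1 [] t).length := by
      rw [hparts, hsp]; simp [hi0]
    have htake : parts.take i0 = sp1 [] p.1 := by
      rw [hparts, hsp, hi0]; exact List.take_left
    have hdrop : parts.drop i0 = sp1 [] t := by
      rw [hparts, hsp, hi0]; exact List.drop_left
    have hjt : jn (sp1 [] t) = t := jn_sp1 [] t
    have hg0 : DESCRIPTIVE_NAMES.get? (PySem.Chars.join ['_'] (PySem.List.slice parts none (some (i0 : Int)))) = some p.2 := by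
      rw [PySem.List.slice_to _ (by positivity), Int.toNat_natCast, join_eq, htake, jn_sp1]
      simp only [List.nil_append]
      exact mem_get? (by rwa [← Prod.mk.eta (p := p)] at hpm)
    have hfd : (PySem.List.pyRange ((parts.length : Int) - 1) 0 (-1)).findSome? (fun i =>
        match DESCRIPTIVE_NAMES.get? (PySem.Chars.join ['_'] (PySem.List.slice parts none (some i))) with
        | some v => some (v ++ '_' :: PySem.Chars.join ['_'] (PySem.List.slice parts (some i) none))
        | none => none) = some (p.2 ++ '_' :: t) := by
      have hcast : (parts.length : Int) - 1 = ((parts.length - 1 : Nat) : Int) := by omega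
      rw [hcast, pyRange_desc]
      apply findSome?_desc _ _ _ ((i0 : Int)) (p.2 ++ '_' :: t)
      · -- the descending range hits i0
        simp only [List.mem_map, List.mem_range]
        exact ⟨parts.length - 1 - i0, by omega, by omega⟩
      · -- value at i0
        simp only [hg0]
        rw [PySem.List.slice_from _ (by positivity), Int.toNat_natCast, hdrop, join_eq, hjt]
      · -- every larger index misses
        intro x hx hgt
        simp only [List.mem_map, List.mem_range] at hx
        obtain ⟨kk, hkk, rfl⟩ := hx
        set x : Int := ((parts.length - 1 : Nat) : Int) - kk with hxdef
        cases hg : DESCRIPTIVE_NAMES.get? (PySem.Chars.join ['_'] (PySem.List.slice parts none (some x))) with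
        | none => simp [hg]
        | some v =>
          exfalso
          have hx1 : 1 ≤ x.toNat := by omega
          have hxlt : x.toNat < parts.length := by omega
          rw [PySem.List.slice_to _ (by omega), join_eq] at hg
          have hmem := get?_mem hg
          have hsplit := jn_take_drop parts x.toNat hx1 hxlt
          rw [hjnparts] at hsplit
          have hle := hmax _ hmem ⟨jn (parts.drop x.toNat), by rw [hsplit]; simp⟩
          simp only at hle
          have hlt : (jn (parts.take i0)).length < (jn (parts.take x.toNat)).length :=
            jn_take_lt parts i0 x.toNat hi01 (by omega) (by omega)
          rw [htake, jn_sp1] at hlt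
          simp only [List.nil_append] at hlt
          omega
      · refine List.Pairwise.map _ ?_ List.pairwise_lt_range
        intro a b hab
        omega
    simp only [hb, hfd, hBslice]

-- ===== VERDICT (by name: the statement is the Claim_ definition above) =====
theorem rename_suffixed_key_py_spec : Claim_equal_rename_suffixed_key_py := by
  intro key _
  unfold Spec_rename_suffixed_key_py rename_suffixed_key_py rename_suffixed_key_py_alt
  rw [renameChars_eq]
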